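-- pv_equiv track=rewrite | github.com/DanJamRod/codingbat | warmup-2/array_front9.py | array_count9
-- ===== SOURCE A (Python) =====
-- def array_count9(nums):
--     """ Given an array of ints, return the number of 9's in the array.
--     """
--     count = 0
--     if len(nums) >= 4:
--         for i in range (4):
--             if nums[i] == 9:
--                 count += 1
--         return count > 0
--     else:
--         for i in range (len(nums)):
--             if nums[i] == 9:
--                 count += 1
--         return count > 0
-- ===== SOURCE B (Python) =====
-- def array_count9(nums):
--     def go(xs, k):
--         if k == 0 or not xs:
--             return False
--         return xs[0] == 9 or go(xs[1:], k - 1)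
--     return go(nums, 4)
-- ===== Notes on version B (the rewrite author's own statement) =====
-- stated objective: simpler
-- what changed: Replaces the length branch and the counting-loop-over-indices with a short-circuiting structural recursion that walks the list head-by-head with a budget of 4, returning as soon as a 9 is seen; no counter, no indexing, no length test.
import Mathlib
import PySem

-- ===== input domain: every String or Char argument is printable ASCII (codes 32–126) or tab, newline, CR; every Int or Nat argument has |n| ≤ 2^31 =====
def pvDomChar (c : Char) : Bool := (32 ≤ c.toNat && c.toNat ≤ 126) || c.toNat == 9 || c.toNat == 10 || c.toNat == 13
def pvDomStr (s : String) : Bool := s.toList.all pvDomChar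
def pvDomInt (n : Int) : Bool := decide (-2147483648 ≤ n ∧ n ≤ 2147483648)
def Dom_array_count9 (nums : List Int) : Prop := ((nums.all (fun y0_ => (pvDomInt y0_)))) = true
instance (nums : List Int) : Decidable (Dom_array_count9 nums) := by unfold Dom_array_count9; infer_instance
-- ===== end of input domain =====

-- B replaces A's length branch and index-counting loop by a short-circuiting head recursion with a budget of 4 (simpler).


-- ===== PORT A =====
def array_count9 (nums : List Int) : Bool :=
  let count : Int := 0
  if nums.length ≥ 4 then
    let count := (PySem.List.pyRange 0 4 1).foldl
      (fun c i => if (PySem.List.pyGet? nums i).getD 0 == 9 then c + 1 else c) count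
    count > 0
  else
    let count := (PySem.List.pyRange 0 (nums.length) 1).foldl
      (fun c i => if (PySem.List.pyGet? nums i).getD 0 == 9 then c + 1 else c) count
    count > 0

-- ===== PORT B =====
def array_count9_go : List Int → Nat → Bool
  | _, 0 => false
  | [], _ => false
  | x :: xs, Nat.succ k => x == 9 || array_count9_go xs k

def array_count9_alt (nums : List Int) : Bool :=
  array_count9_go nums 4

-- ===== PRECONDITION & SPEC =====
def Spec_array_count9 (nums : List Int) (out : Bool) : Prop := out = array_count9_alt nums
instance (nums : List Int) (out : Bool) : Decidable (Spec_array_count9 nums out) := by unfold Spec_array_count9; infer_instance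

-- ===== CLAIM (what is proved, stated in full; the proofs are below) =====
def Claim_equal_array_count9 : Prop := ∀ (nums : List Int), Dom_array_count9 nums → Spec_array_count9 nums (array_count9 nums)

-- ===== LEMMAS AND PROOFS =====
theorem pyGet_cons4 (a b c d : Int) (rest : List Int) :
    (PySem.List.pyGet? (a :: b :: c :: d :: rest) 0 = some a) ∧
    (PySem.List.pyGet? (a :: b :: c :: d :: rest) 1 = some b) ∧
    (PySem.List.pyGet? (a :: b :: c :: d :: rest) 2 = some c) ∧
    (PySem.List.pyGet? (a :: b :: c :: d :: rest) 3 = some d) := by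
  have hB : (0:Int) ≤ (rest.length:Int) + 1 := by omega
  have hC : (0:Int) ≤ (rest.length:Int) + 1 + 1 := by omega
  have hD : (0:Int) ≤ (rest.length:Int) + 1 + 1 + 1 := by omega
  have h2 : (2:Int) ≤ (rest.length:Int) + 1 + 1 + 1 := by omega
  have h3 : (3:Int) ≤ (rest.length:Int) + 1 + 1 + 1 := by omega
  refine ⟨?_, ?_, ?_, ?_⟩ <;>
    simp [PySem.List.pyGet?, PySem.List.pyIdx?, hB, hC, hD, h2, h3, List.getElem?_cons]

-- ===== VERDICT (by name: the statement is the Claim_ definition above) =====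
theorem array_count9_spec : Claim_equal_array_count9 := by
  intro nums _
  unfold Spec_array_count9 array_count9 array_count9_alt
  match nums with
  | [] => decide
  | [a] =>
    simp [PySem.List.pyRange, PySem.List.pyGet?, PySem.List.pyIdx?, array_count9_go,
      List.range_succ]
    by_cases h : a = 9 <;> (try simp [h]) <;> (try omega)
  | [a, b] =>
    simp [PySem.List.pyRange, PySem.List.pyGet?, PySem.List.pyIdx?, array_count9_go,
      List.range_succ]
    by_cases h : a = 9 <;> by_cases h2 : b = 9 <;> (try simp [h, h2]) <;> (try omega)
  | [a, b, c] =>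
    simp [PySem.List.pyRange, PySem.List.pyGet?, PySem.List.pyIdx?, array_count9_go,
      List.range_succ]
    by_cases h : a = 9 <;> by_cases h2 : b = 9 <;> by_cases h3 : c = 9 <;>
      (try simp [h, h2, h3]) <;> (try omega)
  | a :: b :: c :: d :: rest =>
    obtain ⟨g0, g1, g2, g3⟩ := pyGet_cons4 a b c d rest
    simp [PySem.List.pyRange, array_count9_go, List.range_succ, g0, g1, g2, g3]
    by_cases h : a = 9 <;> by_cases h2 : b = 9 <;> by_cases h3 : c = 9 <;> by_cases h4 : d = 9 <;>
      (try simp [h, h2, h3, h4]) <;> (try omega)
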